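-- pv_equiv track=rewrite | github.com/NadinaMaia/IBM | Documents/Nari/faca/Algo_1/python/guia8/simulacro_nadina.py | elementos_exclusivos
-- ===== SOURCE A (Python) =====
-- def elementos_exclusivos(s: list, t: list) -> list:
--     res:list = []
--     #agrego las cosas a res que no se repiten en ambas listas
--     for elemento in s:
--         if not(elemento in t):
--             res.append(elemento)
--     for elemento in t:
--         if not(elemento in s):
--             res.append(elemento)
--     #quito los repetidos de res
--     res_sin_dup:list = []
--     for elemento in res:
--         if not elemento in res_sin_dup:
--             res_sin_dup.append(elemento)
--     return res_sin_dup
-- ===== SOURCE B (Python) =====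
-- def elementos_exclusivos(s: list, t: list) -> list:
--     # One fused pass over s + t with precomputed sets: keep first occurrences of
--     # elements belonging to exactly one of the two lists.
--     set_s = set(s)
--     set_t = set(t)
--     seen = set()
--     out = []
--     for e in s + t:
--         if e in seen:
--             continue
--         if (e in set_s) != (e in set_t):
--             out.append(e)
--             seen.add(e)
--     return out
-- ===== Notes on version B (the rewrite author's own statement) =====
-- stated objective: faster
-- what changed: Replaces A's three passes with quadratic list-membership tests (filter s by 'not in t', filter t by 'not in s', then dedup by 'not in result') by one single pass over s+t using precomputed hash sets and an XOR membership test with a seen-set for dedup.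
import Mathlib
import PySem

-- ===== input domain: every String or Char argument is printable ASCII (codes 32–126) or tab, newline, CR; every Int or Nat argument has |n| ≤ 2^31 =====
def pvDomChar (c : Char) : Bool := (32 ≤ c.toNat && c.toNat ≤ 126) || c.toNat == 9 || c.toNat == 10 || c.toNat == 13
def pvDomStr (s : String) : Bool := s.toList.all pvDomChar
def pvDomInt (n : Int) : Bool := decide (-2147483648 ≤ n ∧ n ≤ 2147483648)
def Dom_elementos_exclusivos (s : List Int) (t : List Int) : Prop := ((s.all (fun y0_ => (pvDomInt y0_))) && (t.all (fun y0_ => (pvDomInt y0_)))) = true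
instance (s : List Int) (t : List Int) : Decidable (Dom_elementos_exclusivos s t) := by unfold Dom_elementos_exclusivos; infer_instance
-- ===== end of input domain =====

-- ===== PORT A =====
-- B fuses A's three quadratic membership passes into one linear pass with sets (objective: faster).
def elementos_exclusivos (s : List Int) (t : List Int) : List Int :=
  let res1 : List Int :=
    s.foldl (fun acc e => if e ∈ t then acc else acc ++ [e]) []
  let res : List Int :=
    t.foldl (fun acc e => if e ∈ s then acc else acc ++ [e]) res1
  res.foldl (fun acc e => if e ∈ acc then acc else acc ++ [e]) []

-- ===== PORT B =====
def elementos_exclusivos_alt (s : List Int) (t : List Int) : List Int :=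
  let setS : PySem.Set Int := PySem.Set.ofList s
  let setT : PySem.Set Int := PySem.Set.ofList t
  (List.foldl
    (fun (st : List Int × PySem.Set Int) e =>
      if e ∈ st.2 then st
      else if decide (e ∈ setS) != decide (e ∈ setT) then
        (st.1 ++ [e], PySem.Set.add st.2 e)
      else st)
    ([], PySem.Set.empty) (s ++ t)).1

-- ===== PRECONDITION & SPEC =====
def Spec_elementos_exclusivos (s : List Int) (t : List Int) (out : List Int) : Prop := out = elementos_exclusivos_alt s t
instance (s : List Int) (t : List Int) (out : List Int) : Decidable (Spec_elementos_exclusivos s t out) := by unfold Spec_elementos_exclusivos; infer_instance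

-- ===== CLAIM (what is proved, stated in full; the proofs are below) =====
def Claim_equal_elementos_exclusivos : Prop := ∀ (s : List Int) (t : List Int), Dom_elementos_exclusivos s t → Spec_elementos_exclusivos s t (elementos_exclusivos s t)

-- ===== LEMMAS AND PROOFS =====

-- A's filter-style loops produce acc ++ filter.
theorem foldl_filter_append {α : Type} (p : α → Prop) [DecidablePred p] (l : List α) (acc : List α) :
    l.foldl (fun acc e => if p e then acc else acc ++ [e]) acc
      = acc ++ l.filter (fun e => !decide (p e)) := by
  induction l generalizing acc with
  | nil => simp
  | cons x xs ih =>
    by_cases h : p x <;> simp [List.foldl, h, ih]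

-- B's fused loop equals dedup-fold of the p-filtered list, given seen ↔ out.
theorem foldl_fused {α : Type} [DecidableEq α] (p : α → Bool) (l : List α)
    (out : List α) (seen : List α) (hinv : ∀ x, x ∈ seen ↔ x ∈ out) :
    (List.foldl
      (fun (st : List α × List α) e =>
        if e ∈ st.2 then st
        else if p e then (st.1 ++ [e], PySem.Set.add st.2 e)
        else st) (out, seen) l).1
      = (l.filter p).foldl (fun acc e => if e ∈ acc then acc else acc ++ [e]) out := by
  induction l generalizing out seen with
  | nil => simp
  | cons x xs ih =>
    by_cases hs : x ∈ seen
    · have ho : x ∈ out := (hinv x).mp hs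
      by_cases hp : p x = true
      · simp [List.foldl, hs, hp, ho, ih _ _ hinv]
      · simp [List.foldl, hs, hp, ih _ _ hinv]
    · by_cases hp : p x = true
      · have hinv' : ∀ y, y ∈ seen ++ [x] ↔ y ∈ out ++ [x] := by
          intro y; simp [hinv y]
        have ho : x ∉ out := fun h => hs ((hinv x).mpr h)
        simp [List.foldl, hs, hp, ho, ih _ _ hinv']
      · simp [List.foldl, hs, hp, ih _ _ hinv]

theorem xor_filter_left (s t : List Int) :
    s.filter (fun e => decide (e ∈ PySem.Set.ofList s) != decide (e ∈ PySem.Set.ofList t))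
      = s.filter (fun e => !decide (e ∈ t)) := by
  apply List.filter_congr
  intro e he
  simp [PySem.Set.mem_ofList, he]

theorem xor_filter_right (s t : List Int) :
    t.filter (fun e => decide (e ∈ PySem.Set.ofList s) != decide (e ∈ PySem.Set.ofList t))
      = t.filter (fun e => !decide (e ∈ s)) := by
  apply List.filter_congr
  intro e he
  by_cases hs : e ∈ s <;> simp [PySem.Set.mem_ofList, he, hs]

-- ===== VERDICT (by name: the statement is the Claim_ definition above) =====
theorem elementos_exclusivos_spec : Claim_equal_elementos_exclusivos := by
  intro s t _
  unfold Spec_elementos_exclusivos elementos_exclusivos elementos_exclusivos_alt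
  rw [foldl_fused _ _ _ _ (by simp [PySem.Set.empty]),
      List.filter_append, xor_filter_left, xor_filter_right]
  simp only [foldl_filter_append, List.nil_append]
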